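-- pv_equiv track=rewrite | github.com/mh70cz/mypy | challenges/pybites/bite_132.py | get_word_max_vowels_
-- ===== SOURCE A (Python) =====
-- VOWELS = list('aeiou')
--
-- def get_word_max_vowels_(text):
--     """sorted alphabetically"""
--     words = text.split(" ")
--     words_v_c = []
--     for w in words:
--         vow_cnt = 0
--         for c in w:
--             if c in VOWELS:
--                 vow_cnt += 1
--         words_v_c.append((w, vow_cnt))
--     pre_sorted = sorted(words_v_c, key=lambda x: x[0])
--     return sorted(pre_sorted, key=lambda x: x[1], reverse=True)[0]
-- ===== SOURCE B (Python) =====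
-- def get_word_max_vowels_(text):
--     """sorted alphabetically"""
--     words = text.split(" ")
--     best_w = words[0]
--     best_c = sum(1 for ch in best_w if ch in "aeiou")
--     for w in words[1:]:
--         c = sum(1 for ch in w if ch in "aeiou")
--         if c > best_c or (c == best_c and w < best_w):
--             best_w, best_c = w, c
--     return (best_w, best_c)
-- ===== Notes on version B (the rewrite author's own statement) =====
-- stated objective: faster
-- what changed: B replaces A's two stable sorts of the (word, vowel-count) list by a single best-so-far pass that keeps the word with the most vowels, ties broken by the alphabetically smaller word.
import Mathlib
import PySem

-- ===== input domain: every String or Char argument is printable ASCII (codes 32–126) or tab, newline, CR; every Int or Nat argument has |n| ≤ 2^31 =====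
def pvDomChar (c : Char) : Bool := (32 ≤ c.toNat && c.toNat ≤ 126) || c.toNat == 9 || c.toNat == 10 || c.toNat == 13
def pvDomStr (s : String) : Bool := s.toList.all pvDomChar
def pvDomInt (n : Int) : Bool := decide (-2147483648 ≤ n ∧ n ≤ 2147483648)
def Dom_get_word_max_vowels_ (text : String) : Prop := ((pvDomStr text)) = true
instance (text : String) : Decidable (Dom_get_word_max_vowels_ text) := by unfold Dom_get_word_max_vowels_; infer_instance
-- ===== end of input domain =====

-- B replaces A's two stable sorts by a single best-so-far pass over the words (O(n) instead of O(n log n) after counting); return values agree everywhere.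

-- ===== PORT A =====
-- VOWELS = list('aeiou')
def pvVOWELS : List Char := "aeiou".toList

-- the inner 'for c in w: if c in VOWELS: vow_cnt += 1' loop of A
def pvVowCntA (w : String) : Int :=
  w.toList.foldl (fun vow_cnt c => if c ∈ pvVOWELS then vow_cnt + 1 else vow_cnt) 0

def get_word_max_vowels_ (text : String) : String × Int :=
  let words := (PySem.Str.split? text " ").getD []          -- sep ≠ "", so never none
  let words_v_c := words.foldl (fun acc w => acc ++ [(w, pvVowCntA w)]) []
  let pre_sorted := PySem.List.sorted words_v_c (fun x => x.1)
  -- sorted(..., reverse=True)[0]; the list is always nonempty, the default is unreachable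
  PySem.List.pyGetD (PySem.List.sorted pre_sorted (fun x => x.2) true) 0 ("", 0)

-- ===== PORT B =====
-- c = sum(1 for ch in w if ch in "aeiou")
def pvVowCntB (w : String) : Int :=
  w.toList.foldl (fun c ch => if ch ∈ "aeiou".toList then c + 1 else c) 0

def get_word_max_vowels__alt (text : String) : String × Int :=
  let words := (PySem.Str.split? text " ").getD []          -- sep ≠ "", so never none
  match words with
  | [] => ("", 0)                                           -- unreachable: split always yields ≥ 1 piece
  | w0 :: rest =>
    rest.foldl
      (fun b w =>
        let c := pvVowCntB w
        if c > b.2 ∨ (c = b.2 ∧ w < b.1) then (w, c) else b)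
      (w0, pvVowCntB w0)

-- ===== PRECONDITION & SPEC =====
def Spec_get_word_max_vowels_ (text : String) (out : String × Int) : Prop := out = get_word_max_vowels__alt text
instance (text : String) (out : String × Int) : Decidable (Spec_get_word_max_vowels_ text out) := by unfold Spec_get_word_max_vowels_; infer_instance

-- ===== CLAIM (what is proved, stated in full; the proofs are below) =====
def Claim_equal_get_word_max_vowels_ : Prop := ∀ (text : String), Dom_get_word_max_vowels_ text → Spec_get_word_max_vowels_ text (get_word_max_vowels_ text)

-- ===== LEMMAS AND PROOFS =====

-- abbreviation used only by the proofs: B's loop body, zeta-reduced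
def pvStepB (b : String × Int) (w : String) : String × Int :=
  if pvVowCntB w > b.2 ∨ (pvVowCntB w = b.2 ∧ w < b.1) then (w, pvVowCntB w) else b

-- "r is the element of l with the most vowels, ties broken by the alphabetically least word"
def pvBest (l : List (String × Int)) (r : String × Int) : Prop :=
  r ∈ l ∧ ∀ y ∈ l, y.2 ≤ r.2 ∧ (y.2 = r.2 → r.1 ≤ y.1)

lemma pvBest_unique {l : List (String × Int)} {r₁ r₂ : String × Int}
    (h₁ : pvBest l r₁) (h₂ : pvBest l r₂) : r₁ = r₂ := by
  obtain ⟨m₁, p₁⟩ := h₁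
  obtain ⟨m₂, p₂⟩ := h₂
  obtain ⟨le₁, tie₁⟩ := p₁ r₂ m₂
  obtain ⟨le₂, tie₂⟩ := p₂ r₁ m₁
  have hc : r₁.2 = r₂.2 := le_antisymm le₂ le₁
  exact Prod.ext (le_antisymm (tie₁ hc.symm) (tie₂ hc)) hc

lemma pvVowCnt_eq (w : String) : pvVowCntA w = pvVowCntB w := rfl

-- head of one reverse insertion step
lemma pv_head_insertBy (x h : String × Int) (t : List (String × Int)) :
    (PySem.List.insertBy (fun a b => decide ((fun p : String × Int => p.2) b < (fun p : String × Int => p.2) a)) x (h :: t)).head?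
      = some (if h.2 < x.2 then x else h) := by
  simp only [PySem.List.insertBy]
  split_ifs with hb <;> simp_all

-- head of the whole reverse insertion sort fold, starting from a nonempty accumulator
lemma pv_head_foldl_insertBy (xs : List (String × Int)) :
    ∀ (acc : List (String × Int)) (h : String × Int), acc.head? = some h →
    (xs.foldl (fun acc x => PySem.List.insertBy (fun a b => decide ((fun p : String × Int => p.2) b < (fun p : String × Int => p.2) a)) x acc) acc).head?
      = some (xs.foldl (fun h x => if h.2 < x.2 then x else h) h) := by
  induction xs with
  | nil => intro acc h hh; simpa using hh
  | cons x t ih =>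
    intro acc h hh
    cases acc with
    | nil => simp at hh
    | cons a rest =>
      simp only [List.head?_cons, Option.some.injEq] at hh
      rw [← hh]
      simp only [List.foldl_cons]
      exact ih _ (if a.2 < x.2 then x else a) (pv_head_insertBy x a rest)

-- the running best-so-far of A's outer sort, over a list already sorted by word, is pvBest
lemma pvBest_foldl_A :
    ∀ (t : List (String × Int)) (h : String × Int),
      (∀ y ∈ t, h.1 ≤ y.1) → t.Pairwise (fun a b => a.1 ≤ b.1) →
      pvBest (h :: t) (t.foldl (fun h x => if h.2 < x.2 then x else h) h) := by
  intro t
  induction t with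
  | nil =>
    intro h _ _
    refine ⟨List.mem_cons_self .., ?_⟩
    intro y hy
    rw [List.mem_singleton] at hy
    subst hy
    exact ⟨le_refl _, fun _ => le_refl _⟩
  | cons x t ih =>
    intro h hle hpw
    have hpw' := hpw.of_cons
    have hx : ∀ y ∈ t, x.1 ≤ y.1 := fun y hy => List.rel_of_pairwise_cons hpw hy
    simp only [List.foldl_cons]
    by_cases hc : h.2 < x.2
    · rw [if_pos hc]
      obtain ⟨rm, rp⟩ := ih x hx hpw'
      refine ⟨List.mem_cons_of_mem h rm, ?_⟩
      intro y hy
      rcases List.mem_cons.mp hy with hyh | hyt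
      · have hxp := rp x (List.mem_cons_self ..)
        subst hyh
        exact ⟨by omega, fun he => absurd he (by omega)⟩
      · exact rp y hyt
    · rw [if_neg hc]
      obtain ⟨rm, rp⟩ := ih h (fun y hy => hle y (List.mem_cons_of_mem x hy)) hpw'
      refine ⟨?_, ?_⟩
      · rcases List.mem_cons.mp rm with h1 | h2
        · rw [h1]; exact List.mem_cons_self ..
        · exact List.mem_cons_of_mem h (List.mem_cons_of_mem x h2)
      · intro y hy
        rcases List.mem_cons.mp hy with hyh | hyt
        · subst hyh; exact rp y (List.mem_cons_self ..)
        · rcases List.mem_cons.mp hyt with hyx | hyt'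
          · have hh := rp h (List.mem_cons_self ..)
            subst hyx
            refine ⟨by omega, fun he => ?_⟩
            have hh2 : h.2 = (t.foldl (fun h x => if h.2 < x.2 then x else h) h).2 := by omega
            exact le_trans (hh.2 hh2) (hle y (List.mem_cons_self ..))
          · exact rp y (List.mem_cons_of_mem h hyt')

-- the membership/extremum invariant of B's single pass
lemma pvBest_foldl_B :
    ∀ (ws : List String) (b : String × Int),
      pvBest (b :: ws.map (fun w => (w, pvVowCntB w))) (ws.foldl pvStepB b) := by
  intro ws
  induction ws with
  | nil =>
    intro b
    refine ⟨List.mem_cons_self .., ?_⟩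
    intro y hy
    rw [List.map_nil, List.mem_singleton] at hy
    subst hy
    exact ⟨le_refl _, fun _ => le_refl _⟩
  | cons w t ih =>
    intro b
    simp only [List.foldl_cons, List.map_cons]
    by_cases hc : pvVowCntB w > b.2 ∨ (pvVowCntB w = b.2 ∧ w < b.1)
    · rw [pvStepB, if_pos hc]
      obtain ⟨rm, rp⟩ := ih (w, pvVowCntB w)
      refine ⟨List.mem_cons_of_mem b rm, ?_⟩
      intro y hy
      rcases List.mem_cons.mp hy with hyb | hyt
      · have hwp := rp (w, pvVowCntB w) (List.mem_cons_self ..)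
        subst hyb
        rcases hc with hlt | ⟨heq, hlt⟩
        · exact ⟨by omega, fun he => absurd he (by omega)⟩
        · refine ⟨by omega, fun he => ?_⟩
          have h2 : (w, pvVowCntB w).2 = (t.foldl pvStepB (w, pvVowCntB w)).2 := by omega
          exact le_trans (hwp.2 h2) (le_of_lt hlt)
      · exact rp y hyt
    · rw [pvStepB, if_neg hc]
      obtain ⟨rm, rp⟩ := ih b
      push_neg at hc
      refine ⟨?_, ?_⟩
      · rcases List.mem_cons.mp rm with h1 | h2
        · rw [h1]; exact List.mem_cons_self ..
        · exact List.mem_cons_of_mem b (List.mem_cons_of_mem _ h2)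
      · intro y hy
        rcases List.mem_cons.mp hy with hyb | hyt
        · subst hyb; exact rp y (List.mem_cons_self ..)
        · rcases List.mem_cons.mp hyt with hyw | hyt'
          · have hbp := rp b (List.mem_cons_self ..)
            subst hyw
            have hc1 : pvVowCntB w ≤ b.2 := by omega
            refine ⟨by omega, fun he => ?_⟩
            have hb2 : b.2 = (t.foldl pvStepB b).2 := by omega
            have hcw : pvVowCntB w = b.2 := by omega
            exact le_trans (hbp.2 hb2) (hc.2 hcw)
          · exact rp y (List.mem_cons_of_mem b hyt')

-- pvBest is invariant under permutation of the list
lemma pvBest_perm {l₁ l₂ : List (String × Int)} (hp : l₁.Perm l₂) {r : String × Int}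
    (h : pvBest l₁ r) : pvBest l₂ r :=
  ⟨hp.mem_iff.mp h.1, fun y hy => h.2 y (hp.mem_iff.mpr hy)⟩

-- words_v_c built by append-folding is a map
lemma pv_words_v_c (ws : List String) :
    ws.foldl (fun acc w => acc ++ [(w, pvVowCntA w)]) [] = ws.map (fun w => (w, pvVowCntA w)) := by
  simpa using PySem.List.foldl_append_singleton_eq_map (fun w => (w, pvVowCntA w)) ws []

-- A's result is pvBest of the word/count pairs
lemma pvBest_A (ws : List String) (hws : ws ≠ []) :
    pvBest (ws.map (fun w => (w, pvVowCntA w)))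
      (PySem.List.pyGetD (PySem.List.sorted (PySem.List.sorted (ws.map (fun w => (w, pvVowCntA w))) (fun x => x.1)) (fun x => x.2) true) 0 ("", 0)) := by
  have hperm := PySem.List.sorted_perm (ws.map (fun w => (w, pvVowCntA w))) (fun x => x.1) false
  have hpw := PySem.List.sorted_pairwise (ws.map (fun w => (w, pvVowCntA w))) (fun x => x.1)
  cases hpree : PySem.List.sorted (ws.map (fun w => (w, pvVowCntA w))) (fun x => x.1) with
  | nil =>
    exfalso
    rw [hpree] at hperm
    exact hws (List.map_eq_nil_iff.mp hperm.symm.eq_nil)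
  | cons p t =>
    rw [hpree] at hperm hpw
    have hh : (PySem.List.sorted (p :: t) (fun x : String × Int => x.2) true).head?
        = some (t.foldl (fun h x => if h.2 < x.2 then x else h) p) := by
      rw [PySem.List.sorted_rev_eq_foldl_insertBy]
      simp only [List.foldl_cons]
      exact pv_head_foldl_insertBy t _ p rfl
    have hb : pvBest (p :: t) (t.foldl (fun h x => if h.2 < x.2 then x else h) p) :=
      pvBest_foldl_A t p (fun y hy => List.rel_of_pairwise_cons hpw hy) hpw.of_cons
    cases hs : PySem.List.sorted (p :: t) (fun x : String × Int => x.2) true with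
    | nil => rw [hs] at hh; simp at hh
    | cons m mt =>
      rw [hs] at hh
      simp only [List.head?_cons, Option.some.injEq] at hh
      rw [PySem.List.pyGetD_zero_cons, hh]
      exact pvBest_perm hperm hb

-- ===== VERDICT (by name: the statement is the Claim_ definition above) =====
theorem get_word_max_vowels__spec : Claim_equal_get_word_max_vowels_ := by
  intro text _
  unfold Spec_get_word_max_vowels_ get_word_max_vowels_ get_word_max_vowels__alt
  cases hw : (PySem.Str.split? text " ").getD [] with
  | nil => rfl
  | cons w0 rest =>
    have hA := pvBest_A (w0 :: rest) (by simp)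
    have hB := pvBest_foldl_B rest (w0, pvVowCntB w0)
    simp only [← pvVowCnt_eq] at hB
    simp only [pv_words_v_c]
    exact pvBest_unique hA hB
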